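-- pv_equiv track=rewrite | github.com/dc487/advent-of-code-2024 | day_02/day_02.py | check_increasing
-- ===== SOURCE A (Python) =====
-- def check_increasing(levels, current_index):
--     if current_index >= len(levels):
--         return False
--
--     current_level = levels[current_index]
--     next_level = levels[current_index + 1]
--     is_safe_increase = next_level > current_level and next_level < current_level + 4
--
--     if current_index + 2 >= len(levels):
--         return is_safe_increase
--     else:
--         return is_safe_increase and check_increasing(levels, current_index + 1)
-- ===== SOURCE B (Python) =====
-- def check_increasing(levels, current_index):
--     if current_index >= len(levels):
--         return False
--     for i in range(current_index, len(levels) - 1):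
--         if not (levels[i] < levels[i + 1] < levels[i] + 4):
--             return False
--     return True
-- ===== Notes on version B (the rewrite author's own statement) =====
-- stated objective: simpler
-- what changed: Replaces A's recursion (with its lookahead pair check and early nested-call cutoff) by a single flat loop over adjacent pairs with early exit.
import Mathlib
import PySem

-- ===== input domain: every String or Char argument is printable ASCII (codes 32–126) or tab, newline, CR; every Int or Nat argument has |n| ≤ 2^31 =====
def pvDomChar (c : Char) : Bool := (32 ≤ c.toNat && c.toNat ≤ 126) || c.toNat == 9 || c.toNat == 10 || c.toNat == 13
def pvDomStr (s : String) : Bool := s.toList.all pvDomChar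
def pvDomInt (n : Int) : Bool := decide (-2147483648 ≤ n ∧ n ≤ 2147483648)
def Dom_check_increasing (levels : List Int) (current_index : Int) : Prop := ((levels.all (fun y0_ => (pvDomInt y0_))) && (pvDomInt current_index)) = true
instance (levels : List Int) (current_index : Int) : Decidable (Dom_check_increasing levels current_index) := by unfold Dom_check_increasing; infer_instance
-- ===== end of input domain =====

-- B replaces A's recursion by a flat early-exit loop over adjacent pairs (objective: simpler); equivalence is about return values on Pre_.

-- ===== PORT A =====
def check_increasing (levels : List Int) (current_index : Int) : Bool :=
  if current_index ≥ (levels.length : Int) then false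
  else
    let current_level := (PySem.List.pyGet? levels current_index).getD 0
    let next_level := (PySem.List.pyGet? levels (current_index + 1)).getD 0
    let is_safe_increase := decide (next_level > current_level) && decide (next_level < current_level + 4)
    if current_index + 2 ≥ (levels.length : Int) then is_safe_increase
    else is_safe_increase && check_increasing levels (current_index + 1)
termination_by ((levels.length : Int) - current_index).toNat
decreasing_by omega

-- ===== PORT B =====
-- the 'for i in range(current_index, len(levels)-1)' loop of Source B, with its early 'return False'
def chkLoop (levels : List Int) (i : Int) : Bool :=
  if i < (levels.length : Int) - 1 then
    if decide ((PySem.List.pyGet? levels i).getD 0 < (PySem.List.pyGet? levels (i + 1)).getD 0)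
       && decide ((PySem.List.pyGet? levels (i + 1)).getD 0 < (PySem.List.pyGet? levels i).getD 0 + 4) then
      chkLoop levels (i + 1)
    else false
  else true
termination_by ((levels.length : Int) - i).toNat
decreasing_by omega

def check_increasing_alt (levels : List Int) (current_index : Int) : Bool :=
  if current_index ≥ (levels.length : Int) then false
  else chkLoop levels current_index

-- ===== PRECONDITION & SPEC =====
-- Pre_ excludes exactly the inputs on which A raises IndexError: current_index = len(levels)-1 ≥ 0
-- (the lookahead levels[current_index+1] is out of range) and current_index < -len(levels).
def Pre_check_increasing (levels : List Int) (current_index : Int) : Prop :=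
  current_index ≥ (levels.length : Int) ∨ (-(levels.length : Int) ≤ current_index ∧ current_index + 1 < (levels.length : Int))
instance (levels : List Int) (current_index : Int) : Decidable (Pre_check_increasing levels current_index) := by unfold Pre_check_increasing; infer_instance
def pvWitness_check_increasing : List Int × Int := ([1, 2], 0)

def Spec_check_increasing (levels : List Int) (current_index : Int) (out : Bool) : Prop := out = check_increasing_alt levels current_index
instance (levels : List Int) (current_index : Int) (out : Bool) : Decidable (Spec_check_increasing levels current_index out) := by unfold Spec_check_increasing; infer_instance

-- ===== CLAIM (what is proved, stated in full; the proofs are below) =====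
def Claim_equal_check_increasing : Prop := ∀ (levels : List Int) (current_index : Int), Dom_check_increasing levels current_index → Pre_check_increasing levels current_index → Spec_check_increasing levels current_index (check_increasing levels current_index)

-- ===== LEMMAS AND PROOFS =====
theorem check_eq_loop (levels : List Int) (current_index : Int)
    (h0 : -(levels.length : Int) ≤ current_index) (h1 : current_index + 1 < (levels.length : Int)) :
    check_increasing levels current_index = chkLoop levels current_index := by
  have hlt : current_index < (levels.length : Int) := by omega
  rw [check_increasing, chkLoop]
  rw [if_neg (show ¬ current_index ≥ (levels.length : Int) by omega)]
  rw [if_pos (show current_index < (levels.length : Int) - 1 by omega)]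
  by_cases h2 : current_index + 2 ≥ (levels.length : Int)
  · rw [if_pos h2]
    have : chkLoop levels (current_index + 1) = true := by
      rw [chkLoop, if_neg (by omega)]
    simp only [this]
    cases hb : decide ((PySem.List.pyGet? levels (current_index + 1)).getD 0 > (PySem.List.pyGet? levels current_index).getD 0) <;>
      simp_all [gt_iff_lt]
  · rw [if_neg h2]
    have ih := check_eq_loop levels (current_index + 1) (by omega) (by omega)
    rw [ih]
    cases hb : decide ((PySem.List.pyGet? levels (current_index + 1)).getD 0 > (PySem.List.pyGet? levels current_index).getD 0) <;>
      simp_all [gt_iff_lt]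
termination_by ((levels.length : Int) - current_index).toNat
decreasing_by omega

-- ===== VERDICT (by name: the statement is the Claim_ definition above) =====
theorem check_increasing_spec : Claim_equal_check_increasing := by
  intro levels current_index _ hpre
  unfold Spec_check_increasing
  rcases hpre with h | ⟨h0, h1⟩
  · rw [check_increasing, check_increasing_alt, if_pos h, if_pos h]
  · rw [check_increasing_alt, if_neg (by omega)]
    exact check_eq_loop levels current_index h0 h1
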